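-- pv_equiv track=rewrite | github.com/roby-avo/moose | src/moose/validate.py | _repair_offsets
-- ===== SOURCE A (Python) =====
-- def _repair_offsets(full_text: str, start: int, end: int, ent_text: str) -> tuple[int, int] | None:
--     ent_text = (ent_text or "").strip()
--     if not ent_text:
--         return None
--
--     matches: list[int] = []
--     pos = full_text.find(ent_text)
--     while pos != -1:
--         matches.append(pos)
--         pos = full_text.find(ent_text, pos + 1)
--
--     if not matches:
--         return None
--
--     best = min(matches, key=lambda i: abs(i - start))
--     return best, best + len(ent_text)
-- ===== SOURCE B (Python) =====
-- def _repair_offsets(full_text: str, start: int, end: int, ent_text: str) -> tuple[int, int] | None: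
--     ent_text = (ent_text or "").strip()
--     if not ent_text:
--         return None
--     m = len(ent_text)
--     if start >= 0:
--         # nearest occurrence at or left of start, and nearest one strictly right of it
--         left = full_text.rfind(ent_text, 0, start + m)
--         right = full_text.find(ent_text, start + 1)
--     else:
--         left = -1
--         right = full_text.find(ent_text)
--     if left == -1 and right == -1:
--         return None
--     if left == -1:
--         best = right
--     elif right == -1:
--         best = left
--     elif right - start < start - left:
--         best = right
--     else:
--         best = left
--     return best, best + m
-- ===== Notes on version B (the rewrite author's own statement) =====
-- stated objective: alternative
-- what changed: Instead of enumerating every occurrence with a find loop and taking min(key=|i-start|), B computes only two candidate occurrences - the nearest at-or-left of start via rfind(ent_text, 0, start+len) and the nearest strictly right of start via find(ent_text, start+1) - and picks the closer one, with the left candidate winning ties exactly as min's earliest tie-break does.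
import Mathlib
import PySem

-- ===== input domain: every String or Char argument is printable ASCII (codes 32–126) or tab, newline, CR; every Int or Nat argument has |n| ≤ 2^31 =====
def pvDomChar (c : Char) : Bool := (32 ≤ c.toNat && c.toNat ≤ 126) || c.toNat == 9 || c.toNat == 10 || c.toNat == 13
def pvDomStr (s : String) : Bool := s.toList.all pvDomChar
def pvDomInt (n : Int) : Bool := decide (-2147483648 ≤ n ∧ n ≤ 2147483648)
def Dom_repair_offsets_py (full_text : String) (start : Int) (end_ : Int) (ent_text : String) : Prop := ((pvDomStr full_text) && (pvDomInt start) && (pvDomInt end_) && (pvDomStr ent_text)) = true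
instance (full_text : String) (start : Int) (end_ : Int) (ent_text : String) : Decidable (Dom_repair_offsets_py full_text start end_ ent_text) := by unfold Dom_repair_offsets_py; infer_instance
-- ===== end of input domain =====

-- B replaces A's enumerate-all-occurrences-then-min(key=|i-start|) by computing only TWO
-- candidate occurrences — the nearest at-or-left of start via rfind(ent, 0, start+len) and the
-- nearest strictly right of start via find(ent, start+1) — and choosing between them (left wins
-- ties, which is min's earliest tie-break). Alternative algorithm, same results.

-- ===== PORT A =====
-- the while-loop: matches.append(pos); pos = full_text.find(ent_text, pos + 1)
-- (fuel only makes the recursion total; length+1 steps always suffice, proved below)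
def repairLoopA (s sub : List Char) : Nat → Int → List Int
  | 0, _ => []
  | fuel + 1, pos =>
    if pos = -1 then []
    else pos :: repairLoopA s sub fuel (PySem.Chars.findFrom s sub (pos + 1))

def repair_offsets_py (full_text : String) (start : Int) (end_ : Int) (ent_text : String) : Option (Int × Int) :=
  -- (ent_text or "") is ent_text itself for a str argument
  let ent := PySem.Str.strip ent_text
  if ent = "" then none
  else
    let s := full_text.toList
    let sub := ent.toList
    let ms := repairLoopA s sub (s.length + 1) (PySem.Chars.find s sub)
    if ms = [] then none
    else
      match PySem.List.min? ms (fun i => |i - start|) with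
      | none => none
      | some best => some (best, best + (sub.length : Int))

-- ===== PORT B =====
def repair_offsets_py_alt (full_text : String) (start : Int) (end_ : Int) (ent_text : String) : Option (Int × Int) :=
  let ent := PySem.Str.strip ent_text
  if ent = "" then none
  else
    let s := full_text.toList
    let sub := ent.toList
    let m : Int := sub.length
    -- if start >= 0: left = full_text.rfind(ent, 0, start+m); right = full_text.find(ent, start+1)
    -- else: left = -1; right = full_text.find(ent)
    let lr : Int × Int :=
      if 0 ≤ start then
        (PySem.Chars.rfindFrom s sub 0 (some (start + m)), PySem.Chars.findFrom s sub (start + 1))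
      else
        (-1, PySem.Chars.find s sub)
    let left := lr.1
    let right := lr.2
    if left = -1 ∧ right = -1 then none
    else if left = -1 then some (right, right + m)
    else if right = -1 then some (left, left + m)
    else if right - start < start - left then some (right, right + m)
    else some (left, left + m)

-- ===== PRECONDITION & SPEC =====
def Spec_repair_offsets_py (full_text : String) (start : Int) (end_ : Int) (ent_text : String) (out : Option (Int × Int)) : Prop := out = repair_offsets_py_alt full_text start end_ ent_text
instance (full_text : String) (start : Int) (end_ : Int) (ent_text : String) (out : Option (Int × Int)) : Decidable (Spec_repair_offsets_py full_text start end_ ent_text out) := by unfold Spec_repair_offsets_py; infer_instance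

-- ===== CLAIM (what is proved, stated in full; the proofs are below) =====
def Claim_equal_repair_offsets_py : Prop := ∀ (full_text : String) (start : Int) (end_ : Int) (ent_text : String), Dom_repair_offsets_py full_text start end_ ent_text → Spec_repair_offsets_py full_text start end_ ent_text (repair_offsets_py full_text start end_ ent_text)

-- ===== LEMMAS AND PROOFS =====

-- a prefix of a later drop is an infix of an earlier drop
theorem prefix_drop_infix {s sub : List Char} {j k : Nat} (hkj : k ≤ j)
    (h : sub <+: s.drop j) : sub <:+: s.drop k := by
  obtain ⟨t, ht⟩ := h
  refine ⟨(s.drop k).take (j - k), t, ?_⟩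
  have hdd : (s.drop k).drop (j - k) = s.drop j := by
    rw [List.drop_drop]; congr 1; omega
  calc (s.drop k).take (j - k) ++ sub ++ t
      = (s.drop k).take (j - k) ++ (sub ++ t) := by rw [List.append_assoc]
    _ = (s.drop k).take (j - k) ++ (s.drop k).drop (j - k) := by rw [ht, hdd]
    _ = s.drop k := List.take_append_drop _ _

-- splitting the filtered range at the first match ≥ k
theorem filter_range_split {n k r : Nat} (p : Nat → Bool) (hkr : k ≤ r) (hrn : r < n)
    (hp : p r = true) (hmin : ∀ i, k ≤ i → i < r → p i = false) :
    (List.range n).filter (fun j => decide (k ≤ j) && p j)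
      = r :: (List.range n).filter (fun j => decide (r + 1 ≤ j) && p j) := by
  have hsplit : n = (r + 1) + (n - (r + 1)) := by omega
  rw [hsplit, List.range_add, List.filter_append, List.filter_append, List.range_succ,
    List.filter_append, List.filter_append]
  have h1 : (List.range r).filter (fun j => decide (k ≤ j) && p j) = [] := by
    rw [List.filter_eq_nil_iff]
    intro j hj
    simp only [List.mem_range] at hj
    by_cases hkj : k ≤ j
    · simp [hmin j hkj hj]
    · simp [hkj]
  have h1' : (List.range r).filter (fun j => decide (r + 1 ≤ j) && p j) = [] := by
    rw [List.filter_eq_nil_iff]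
    intro j hj
    simp only [List.mem_range] at hj
    have : ¬ (r + 1 ≤ j) := by omega
    simp [this]
  have h2 : ([r] : List Nat).filter (fun j => decide (k ≤ j) && p j) = [r] := by
    simp [List.filter, hkr, hp]
  have h2' : ([r] : List Nat).filter (fun j => decide (r + 1 ≤ j) && p j) = [] := by
    simp [List.filter]
  have h3 : ((List.range (n - (r + 1))).map (fun j => r + 1 + j)).filter
      (fun j => decide (k ≤ j) && p j)
      = ((List.range (n - (r + 1))).map (fun j => r + 1 + j)).filter
      (fun j => decide (r + 1 ≤ j) && p j) := by
    apply List.filter_congr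
    intro j hj
    simp only [List.mem_map] at hj
    obtain ⟨i, _, hij⟩ := hj
    have hk : k ≤ j := by omega
    have hr : r + 1 ≤ j := by omega
    simp [hk, hr]
  rw [h1, h1', h2, h2', h3]
  simp

-- the while-loop collects exactly the indices where sub is a prefix, in order
theorem repairLoopA_eq (s sub : List Char) (hsub : sub ≠ []) :
    ∀ (fuel k : Nat), k ≤ s.length → s.length + 1 - k ≤ fuel →
    repairLoopA s sub fuel (PySem.Chars.findFrom s sub (k : Int))
      = (((List.range s.length).filter
          (fun j => decide (k ≤ j) && sub.isPrefixOf (s.drop j))).map (fun (j : Nat) => (j : Int))) := by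
  intro fuel
  induction fuel with
  | zero => intro k hk hf; omega
  | succ fuel ih =>
    intro k hk hf
    by_cases hr : PySem.Chars.findFrom s sub (k : Int) = -1
    · rw [repairLoopA, if_pos hr]
      have hno : ¬ sub <:+: s.drop k :=
        (PySem.Chars.findFrom_natCast_eq_neg_one_iff s sub k hk).mp hr
      symm
      rw [List.map_eq_nil_iff, List.filter_eq_nil_iff]
      intro j hj
      simp only [List.mem_range] at hj
      by_cases hkj : k ≤ j
      · have hnp : sub.isPrefixOf (s.drop j) = false := by
          rw [Bool.eq_false_iff]
          intro hx
          exact hno (prefix_drop_infix hkj (List.isPrefixOf_iff_prefix.mp hx))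
        simp [hnp]
      · simp [hkj]
    · obtain ⟨hle, hpre, hmin⟩ := PySem.Chars.findFrom_natCast_spec s sub k hk hr
      set r := PySem.Chars.findFrom s sub (k : Int) with hrdef
      have hr0 : 0 ≤ r := le_trans (by exact_mod_cast Nat.zero_le k) hle
      have hrtoNat : r = ((r.toNat : Nat) : Int) := by omega
      have hrn : r.toNat < s.length := by
        by_contra hge
        have : s.drop r.toNat = [] := List.drop_eq_nil_of_le (by omega)
        rw [this] at hpre
        exact hsub (List.prefix_nil.mp hpre)
      have hkr : k ≤ r.toNat := by omega
      rw [repairLoopA, if_neg hr]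
      have hsucc : r + 1 = ((r.toNat + 1 : Nat) : Int) := by omega
      rw [hsucc, ih (r.toNat + 1) (by omega) (by omega)]
      rw [filter_range_split (fun j => sub.isPrefixOf (s.drop j)) hkr hrn
        (List.isPrefixOf_iff_prefix.mpr hpre)
        (fun i hki hir => by
          rw [Bool.eq_false_iff]
          intro hx
          exact hmin i hki hir (List.isPrefixOf_iff_prefix.mp hx))]
      rw [List.map_cons, ← hrtoNat]

-- abbreviations used throughout the equivalence proof
-- occurrence predicate and the list of all occurrences (as Ints, increasing)
def pvOcc (s sub : List Char) (j : Nat) : Bool := sub.isPrefixOf (s.drop j)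

def pvFl (s sub : List Char) : List Int :=
  ((List.range s.length).filter (pvOcc s sub)).map (fun (j : Nat) => (j : Int))

-- the fold performed by PySem.List.min? with key |· - start|
def pvStep (start : Int) (acc : Option Int) (x : Int) : Option Int :=
  match acc with
  | none => some x
  | some b => if |x - start| < |b - start| then some x else some b

-- "LI is python's rfind(ent, 0, start+m)-style left candidate" / "RI is the right candidate"
def pvIsLeft (s sub : List Char) (start LI : Int) : Prop :=
  (LI = -1 ∧ ∀ j : Nat, pvOcc s sub j → ¬ ((j : Int) ≤ start)) ∨
  (0 ≤ LI ∧ pvOcc s sub LI.toNat ∧ LI ≤ start ∧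
    ∀ j : Nat, pvOcc s sub j → (j : Int) ≤ start → j ≤ LI.toNat)

def pvIsRight (s sub : List Char) (start RI : Int) : Prop :=
  (RI = -1 ∧ ∀ j : Nat, pvOcc s sub j → ¬ (start < (j : Int))) ∨
  (0 ≤ RI ∧ pvOcc s sub RI.toNat ∧ start < RI ∧
    ∀ j : Nat, pvOcc s sub j → start < (j : Int) → RI.toNat ≤ j)

theorem occ_lt {s sub : List Char} (hsub : sub ≠ []) {j : Nat} (h : pvOcc s sub j) :
    j < s.length := by
  by_contra hge
  have hnil : s.drop j = [] := List.drop_eq_nil_of_le (by omega)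
  have hpre := List.isPrefixOf_iff_prefix.mp h
  rw [hnil] at hpre
  exact hsub (List.prefix_nil.mp hpre)

theorem mem_pvFl {s sub : List Char} (hsub : sub ≠ []) {y : Int} :
    y ∈ pvFl s sub ↔ ∃ j : Nat, pvOcc s sub j ∧ y = (j : Int) := by
  unfold pvFl
  simp only [List.mem_map, List.mem_filter, List.mem_range]
  constructor
  · rintro ⟨j, ⟨_, hj⟩, rfl⟩; exact ⟨j, hj, rfl⟩
  · rintro ⟨j, hj, rfl⟩; exact ⟨j, ⟨occ_lt hsub hj, hj⟩, rfl⟩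

theorem pairwise_pvFl (s sub : List Char) : (pvFl s sub).Pairwise (· < ·) := by
  unfold pvFl
  refine List.Pairwise.map _ ?_ (List.Pairwise.filter _ List.pairwise_lt_range)
  intro a b hab
  exact_mod_cast hab

-- the rfind scan = Nat.findGreatest of the prefix predicate
theorem rfind_go_eq (t sub : List Char) (k : Nat) :
    PySem.Chars.rfind.go t sub k =
      if ∃ j ≤ k, sub.isPrefixOf (t.drop j) = true
      then ((Nat.findGreatest (fun j => sub.isPrefixOf (t.drop j) = true) k : Nat) : Int)
      else -1 := by
  induction k with
  | zero =>
    have hgo : PySem.Chars.rfind.go t sub 0 = if sub.isPrefixOf t then 0 else -1 := by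
      rw [PySem.Chars.rfind.go]
    rw [hgo]
    by_cases h : sub.isPrefixOf t = true
    · rw [if_pos h, if_pos ⟨0, le_refl _, by simpa using h⟩]
      simp [Nat.findGreatest]
    · rw [if_neg h, if_neg ?_]
      rintro ⟨j, hj, hpj⟩
      interval_cases j
      exact h (by simpa using hpj)
  | succ k ih =>
    have hgo : PySem.Chars.rfind.go t sub (k + 1)
        = if sub.isPrefixOf (t.drop (k + 1)) then ((k : Int) + 1)
          else PySem.Chars.rfind.go t sub k := by
      rw [PySem.Chars.rfind.go]; split <;> simp
    rw [hgo, Nat.findGreatest_succ]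
    by_cases h : sub.isPrefixOf (t.drop (k + 1)) = true
    · rw [if_pos h, if_pos h, if_pos ⟨k + 1, le_refl _, h⟩]
      push_cast; ring
    · have hiff : (∃ j ≤ k + 1, sub.isPrefixOf (t.drop j) = true) ↔
          (∃ j ≤ k, sub.isPrefixOf (t.drop j) = true) := by
        constructor
        · rintro ⟨j, hj, hpj⟩
          rcases Nat.lt_or_ge j (k + 1) with hlt | hge
          · exact ⟨j, by omega, hpj⟩
          · have hje : j = k + 1 := by omega
            rw [hje] at hpj; exact absurd hpj h
        · rintro ⟨j, hj, hpj⟩; exact ⟨j, by omega, hpj⟩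
      rw [if_neg h, if_neg h, ih]
      by_cases hex : ∃ j ≤ k, sub.isPrefixOf (t.drop j) = true
      · rw [if_pos hex, if_pos (hiff.mpr hex)]
      · rw [if_neg hex, if_neg (fun hx => hex (hiff.mp hx))]

theorem occ_len {s sub : List Char} (hsub : sub ≠ []) {j : Nat} (h : pvOcc s sub j) :
    j + sub.length ≤ s.length := by
  have h1 := occ_lt hsub h
  have h2 := (List.isPrefixOf_iff_prefix.mp h).length_le
  rw [List.length_drop] at h2
  omega

theorem pvIsLeft_rfind (s sub : List Char) (hsub : sub ≠ []) (start : Int) (hst : 0 ≤ start) :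
    pvIsLeft s sub start
      (PySem.Chars.rfindFrom s sub 0 (some (start + (sub.length : Int)))) := by
  have hm : 0 < sub.length := List.length_pos_iff.mpr hsub
  have hlen : ∀ j : Nat, pvOcc s sub j → j + sub.length ≤ s.length :=
    fun j hj => occ_len hsub hj
  set m : Int := (sub.length : Int) with hmdef
  set eN : Nat := min s.length (start + m).toNat with heN
  have heq : PySem.Chars.rfindFrom s sub 0 (some (start + m))
      = (if PySem.Chars.rfind.go (s.take eN) sub (s.take eN).length = -1 then -1
         else PySem.Chars.rfind.go (s.take eN) sub (s.take eN).length) := by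
    simp only [PySem.Chars.rfindFrom, PySem.Chars.rfind]
    have h1 : ¬ ((0 : Int) < 0) := by omega
    have h2 : ¬ (start + m < 0) := by
      have : (0:Int) ≤ m := by rw [hmdef]; exact_mod_cast Nat.zero_le _
      omega
    rw [if_neg h1, if_neg h2]
    have he' : (if (s.length : Int) < start + m then (s.length : Int) else start + m).toNat = eN := by
      rw [heN]; split_ifs <;> omega
    have he0 : ¬ ((if (s.length : Int) < start + m then (s.length : Int) else start + m) < 0) := by
      split_ifs <;> omega
    rw [if_neg he0, show ((0 : Int)).toNat = 0 from rfl, List.drop_zero, he']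
    split_ifs with h
    · rfl
    · omega
  set t := s.take eN with htdef
  have htlen : t.length = eN := by
    rw [htdef, List.length_take]; omega
  have hcond : ∀ j : Nat, (sub.isPrefixOf (t.drop j) = true) ↔ (pvOcc s sub j ∧ (j : Int) ≤ start) := by
    intro j
    unfold pvOcc
    rw [htdef, List.drop_take, List.isPrefixOf_iff_prefix, List.prefix_take_iff,
      ← List.isPrefixOf_iff_prefix]
    constructor
    · rintro ⟨hp, hl⟩
      have := hlen j hp
      exact ⟨hp, by omega⟩
    · rintro ⟨hp, hjs⟩
      have := hlen j hp
      exact ⟨hp, by omega⟩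
  rw [heq, htlen, rfind_go_eq]
  by_cases hex : ∃ j ≤ eN, sub.isPrefixOf (t.drop j) = true
  · rw [if_pos hex]
    set g := Nat.findGreatest (fun j => sub.isPrefixOf (t.drop j) = true) eN with hg
    have hgne : ((g : Nat) : Int) ≠ -1 := by omega
    rw [if_neg hgne]
    right
    obtain ⟨j0, hj0le, hj0⟩ := hex
    have hPg : sub.isPrefixOf (t.drop g) = true :=
      Nat.findGreatest_spec (P := fun j => sub.isPrefixOf (t.drop j) = true) hj0le hj0
    obtain ⟨hocc, hgle⟩ := (hcond g).mp hPg
    refine ⟨by omega, by simpa using hocc, by simpa using hgle, ?_⟩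
    intro j hj hjle
    have hjeN : j ≤ eN := by
      have := hlen j hj
      omega
    by_contra hgt
    have hgt' : g < j := by simp only [Int.toNat_natCast] at hgt; omega
    exact absurd ((hcond j).mpr ⟨hj, hjle⟩) (Nat.findGreatest_is_greatest hgt' hjeN)
  · rw [if_neg hex]
    left
    refine ⟨rfl, ?_⟩
    intro j hj hjs
    have hjeN : j ≤ eN := by
      have := hlen j hj
      omega
    exact hex ⟨j, hjeN, (hcond j).mpr ⟨hj, hjs⟩⟩

theorem pvIsRight_findFrom (s sub : List Char) (hsub : sub ≠ []) (start : Int) (hst : 0 ≤ start) :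
    pvIsRight s sub start (PySem.Chars.findFrom s sub (start + 1)) := by
  rcases le_or_gt (start + 1) (s.length : Int) with hle | hgt
  · set k : Nat := (start + 1).toNat with hk
    have hkc : start + 1 = ((k : Nat) : Int) := by omega
    have hkn : k ≤ s.length := by omega
    rw [hkc]
    by_cases hneg : PySem.Chars.findFrom s sub ((k : Nat) : Int) = -1
    · rw [hneg]
      left
      refine ⟨rfl, ?_⟩
      intro j hj hjs
      have hno := (PySem.Chars.findFrom_natCast_eq_neg_one_iff s sub k hkn).mp hneg
      have hkj : k ≤ j := by omega
      exact hno (prefix_drop_infix hkj (List.isPrefixOf_iff_prefix.mp hj))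
    · obtain ⟨hge, hpre, hmin⟩ := PySem.Chars.findFrom_natCast_spec s sub k hkn hneg
      right
      set RI := PySem.Chars.findFrom s sub ((k : Nat) : Int) with hRI
      have h0 : 0 ≤ RI := le_trans (by omega) hge
      refine ⟨h0, List.isPrefixOf_iff_prefix.mpr hpre, by omega, ?_⟩
      intro j hj hjs
      by_contra hlt
      exact hmin j (by omega) (by omega) (List.isPrefixOf_iff_prefix.mp hj)
  · have hneg : PySem.Chars.findFrom s sub (start + 1) = -1 := by
      simp only [PySem.Chars.findFrom]
      rw [if_neg (by omega : ¬ (start + 1 < 0)), if_pos (by omega : (s.length : Int) < start + 1)]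
    rw [hneg]
    left
    refine ⟨rfl, ?_⟩
    intro j hj hjs
    have := occ_lt hsub hj
    omega

theorem pvIsLeft_neg (s sub : List Char) (start : Int) (hst : start < 0) :
    pvIsLeft s sub start (-1) := by
  left
  exact ⟨rfl, fun j _ h => by omega⟩

theorem pvIsRight_neg (s sub : List Char) (hsub : sub ≠ []) (start : Int) (hst : start < 0) :
    pvIsRight s sub start (PySem.Chars.find s sub) := by
  by_cases hneg : PySem.Chars.find s sub = -1
  · rw [hneg]
    left
    refine ⟨rfl, ?_⟩
    intro j hj _
    have hno := (PySem.Chars.find_eq_neg_one_iff s sub).mp hneg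
    have : sub <:+: s.drop 0 := prefix_drop_infix (Nat.zero_le j) (List.isPrefixOf_iff_prefix.mp hj)
    rw [List.drop_zero] at this
    exact hno this
  · have h0 : 0 ≤ PySem.Chars.find s sub := by
      have := PySem.Chars.neg_one_le_find s sub
      omega
    obtain ⟨hpre, hmin⟩ := PySem.Chars.find_spec h0
    right
    refine ⟨h0, List.isPrefixOf_iff_prefix.mpr hpre, by omega, ?_⟩
    intro j hj hjs
    by_contra hlt
    exact hmin j (by omega) (List.isPrefixOf_iff_prefix.mp hj)

-- generic facts about strictly increasing Int lists and the min?-fold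
theorem gt_of_mem_dropWhile_le {l : List Int} {start y : Int} (hpw : l.Pairwise (· < ·))
    (hy : y ∈ l.dropWhile (fun z => decide (z ≤ start))) : start < y := by
  induction l with
  | nil => simp at hy
  | cons x t ih =>
    by_cases hx : x ≤ start
    · rw [List.dropWhile_cons, if_pos (by simpa using hx)] at hy
      exact ih hpw.of_cons hy
    · rw [List.dropWhile_cons, if_neg (by simpa using hx)] at hy
      rcases List.mem_cons.mp hy with rfl | hyt
      · omega
      · have := (List.pairwise_cons.mp hpw).1 y hyt
        omega

theorem mem_le_getLast {l : List Int} (h : l ≠ []) (hpw : l.Pairwise (· < ·)) :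
    ∀ y ∈ l, y ≤ l.getLast h := by
  induction l with
  | nil => exact absurd rfl h
  | cons x t ih =>
    intro y hy
    cases t with
    | nil =>
      rcases List.mem_cons.mp hy with rfl | hyt
      · simp
      · simp at hyt
    | cons a t' =>
      rw [List.getLast_cons (by simp)]
      rcases List.mem_cons.mp hy with rfl | hyt
      · have hmem := List.getLast_mem (l := a :: t') (by simp)
        have := (List.pairwise_cons.mp hpw).1 _ hmem
        omega
      · exact ih (by simp) hpw.of_cons y hyt

theorem keepF (start : Int) : ∀ (l : List Int) (b : Int),
    (∀ y ∈ l, ¬ |y - start| < |b - start|) → l.foldl (pvStep start) (some b) = some b := by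
  intro l
  induction l with
  | nil => intro b _; rfl
  | cons x t ih =>
    intro b hb
    have hx : pvStep start (some b) x = some b := by
      show (if |x - start| < |b - start| then some x else some b) = some b
      rw [if_neg (hb x List.mem_cons_self)]
    rw [List.foldl_cons, hx]
    exact ih b (fun y hy => hb y (List.mem_cons_of_mem _ hy))

theorem descF (start : Int) : ∀ (l : List Int) (h : l ≠ []),
    (∀ y ∈ l, y ≤ start) → l.Pairwise (· < ·) →
    l.foldl (pvStep start) none = some (l.getLast h) := by
  intro l
  induction l with
  | nil => intro h; exact absurd rfl h
  | cons x t ih =>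
    intro h hle hpw
    cases t with
    | nil => rfl
    | cons a t' =>
      have hxa : x < a := (List.pairwise_cons.mp hpw).1 a List.mem_cons_self
      have hstep : pvStep start (some x) a = some a := by
        show (if |a - start| < |x - start| then some a else some x) = some a
        rw [if_pos]
        have hax : a ≤ start := hle a (by simp)
        have hxs : x ≤ start := hle x (by simp)
        rw [abs_of_nonpos (by omega), abs_of_nonpos (by omega)]
        omega
      have hch : (x :: a :: t').foldl (pvStep start) none = (a :: t').foldl (pvStep start) none := by
        rw [List.foldl_cons, List.foldl_cons]
        show (t'.foldl (pvStep start) (pvStep start (some x) a)) = _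
        rw [hstep]
        rfl
      rw [hch, ih (by simp) (fun y hy => hle y (List.mem_cons_of_mem _ hy)) hpw.of_cons]
      exact congrArg some (List.getLast_cons (by simp : (a :: t') ≠ [])).symm

-- min? over the occurrence list equals the two-candidate selection
theorem min_eq_sel (s sub : List Char) (hsub : sub ≠ []) (start LI RI : Int)
    (hL : pvIsLeft s sub start LI) (hR : pvIsRight s sub start RI) :
    (pvFl s sub ≠ [] → PySem.List.min? (pvFl s sub) (fun i => |i - start|)
      = some (if LI = -1 then RI else if RI = -1 then LI
              else if RI - start < start - LI then RI else LI))
    ∧ (pvFl s sub = [] ↔ (LI = -1 ∧ RI = -1)) := by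
  set fl := pvFl s sub with hfl
  set q : Int → Bool := fun y => decide (y ≤ start) with hq
  set AL := fl.takeWhile q with hAL
  set BL := fl.dropWhile q with hBL
  have hsplit : AL ++ BL = fl := List.takeWhile_append_dropWhile
  have hpw : fl.Pairwise (· < ·) := pairwise_pvFl s sub
  have hpwAL : AL.Pairwise (· < ·) := List.Pairwise.sublist (List.takeWhile_sublist q) hpw
  have hpwBL : BL.Pairwise (· < ·) := List.Pairwise.sublist (List.dropWhile_sublist q) hpw
  have hALle : ∀ y ∈ AL, y ≤ start := fun y hy => by
    have := List.mem_takeWhile_imp hy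
    simpa [hq] using this
  have hBLgt : ∀ y ∈ BL, start < y := fun y hy => gt_of_mem_dropWhile_le hpw hy
  have hALsub : ∀ y ∈ AL, y ∈ fl := fun y hy => (List.takeWhile_sublist q).mem hy
  have hBLsub : ∀ y ∈ BL, y ∈ fl := fun y hy => (List.dropWhile_sublist q).mem hy
  have hALmem : ∀ y, y ∈ fl → y ≤ start → y ∈ AL := by
    intro y hy hys
    rcases List.mem_append.mp (hsplit ▸ hy) with h | h
    · exact h
    · exact absurd (hBLgt y h) (by omega)
  have hBLmem : ∀ y, y ∈ fl → start < y → y ∈ BL := by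
    intro y hy hys
    rcases List.mem_append.mp (hsplit ▸ hy) with h | h
    · exact absurd (hALle y h) (by omega)
    · exact h
  -- left candidate vs AL
  have hLAL : (AL = [] → LI = -1) ∧ (∀ (h : AL ≠ []), LI = AL.getLast h ∧ 0 ≤ LI) := by
    rcases hL with ⟨hL1, hL2⟩ | ⟨h0, hocc, hle, hmax⟩
    · constructor
      · intro _; exact hL1
      · intro h
        obtain ⟨y, hy⟩ := List.exists_mem_of_ne_nil _ h
        obtain ⟨j, hj, rfl⟩ := (mem_pvFl hsub).mp (hALsub y hy)
        exact absurd (hALle _ hy) (hL2 j hj)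
    · have hLfl : LI ∈ fl := (mem_pvFl hsub).mpr ⟨LI.toNat, hocc, by omega⟩
      have hLAL' : LI ∈ AL := hALmem LI hLfl hle
      constructor
      · intro h; rw [h] at hLAL'; simp at hLAL'
      · intro h
        have h1 : LI ≤ AL.getLast h := mem_le_getLast h hpwAL LI hLAL'
        have h2 : AL.getLast h ≤ LI := by
          obtain ⟨j, hj, hjeq⟩ := (mem_pvFl hsub).mp (hALsub _ (List.getLast_mem h))
          have hjs : (j : Int) ≤ start := hjeq ▸ hALle _ (List.getLast_mem h)
          have := hmax j hj hjs
          omega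
        exact ⟨by omega, h0⟩
  -- right candidate vs BL
  have hRBL : (BL = [] → RI = -1) ∧ (∀ x t, BL = x :: t → RI = x ∧ 0 ≤ RI) := by
    rcases hR with ⟨hR1, hR2⟩ | ⟨h0, hocc, hgt, hmin⟩
    · constructor
      · intro _; exact hR1
      · intro x t hxt
        have hy : x ∈ BL := by rw [hxt]; exact List.mem_cons_self
        obtain ⟨j, hj, hjeq⟩ := (mem_pvFl hsub).mp (hBLsub x hy)
        exact absurd (hjeq ▸ hBLgt _ hy) (hR2 j hj)
    · have hRfl : RI ∈ fl := (mem_pvFl hsub).mpr ⟨RI.toNat, hocc, by omega⟩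
      have hRBL' : RI ∈ BL := hBLmem RI hRfl hgt
      constructor
      · intro h; rw [h] at hRBL'; simp at hRBL'
      · intro x t hxt
        have h1 : x ≤ RI := by
          rw [hxt] at hRBL'
          rcases List.mem_cons.mp hRBL' with rfl | hmem
          · exact le_refl _
          · have hx : x < RI := by
              rw [hxt] at hpwBL
              exact (List.pairwise_cons.mp hpwBL).1 RI hmem
            omega
        have h2 : RI ≤ x := by
          obtain ⟨j, hj, hjeq⟩ := (mem_pvFl hsub).mp (hBLsub x (by rw [hxt]; exact List.mem_cons_self))
          have hjs : start < (j : Int) := hjeq ▸ hBLgt x (by rw [hxt]; exact List.mem_cons_self)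
          have := hmin j hj hjs
          omega
        exact ⟨by omega, h0⟩
  have hfold : PySem.List.min? fl (fun i => |i - start|) = fl.foldl (pvStep start) none := by
    unfold PySem.List.min?
    apply List.foldl_ext
    intro acc y _
    cases acc <;> rfl
  -- part 2 first
  have hpart2 : fl = [] ↔ (LI = -1 ∧ RI = -1) := by
    constructor
    · intro h
      have hALe : AL = [] := by rw [hAL, h]; rfl
      have hBLe : BL = [] := by rw [hBL, h]; rfl
      exact ⟨hLAL.1 hALe, hRBL.1 hBLe⟩
    · rintro ⟨hLn, hRn⟩
      have hL2 : ∀ j : Nat, pvOcc s sub j → ¬ ((j : Int) ≤ start) := by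
        rcases hL with ⟨_, h⟩ | ⟨h0, _⟩
        · exact h
        · omega
      have hR2 : ∀ j : Nat, pvOcc s sub j → ¬ (start < (j : Int)) := by
        rcases hR with ⟨_, h⟩ | ⟨h0, _⟩
        · exact h
        · omega
      rw [List.eq_nil_iff_forall_not_mem]
      intro y hy
      obtain ⟨j, hj, rfl⟩ := (mem_pvFl hsub).mp hy
      rcases le_or_gt ((j : Nat) : Int) start with h | h
      · exact hL2 j hj h
      · exact hR2 j hj h
  refine ⟨?_, hpart2⟩
  intro hflne
  rw [hfold, ← hsplit, List.foldl_append]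
  by_cases hALe : AL = []
  · -- only the right candidate exists
    have hLn : LI = -1 := hLAL.1 hALe
    have hBLne : BL ≠ [] := by
      intro h
      exact hflne (by rw [← hsplit, hALe, h]; rfl)
    obtain ⟨x, t, hxt⟩ := List.exists_cons_of_ne_nil hBLne
    obtain ⟨hxRI', hR0⟩ := hRBL.2 x t hxt
    have hxRI : x = RI := hxRI'.symm
    rw [hALe, List.foldl_nil, hxt, List.foldl_cons]
    show t.foldl (pvStep start) (some x) = _
    have hkeep : t.foldl (pvStep start) (some x) = some x := by
      apply keepF
      intro y hy
      have hxy : x < y := by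
        rw [hxt] at hpwBL
        exact (List.pairwise_cons.mp hpwBL).1 y hy
      have hxgt : start < x := hBLgt x (by rw [hxt]; exact List.mem_cons_self)
      have hygt : start < y := by omega
      rw [abs_of_pos (by omega : (0:Int) < y - start), abs_of_pos (by omega : (0:Int) < x - start)]
      omega
    rw [hkeep, hxRI, if_pos hLn]
  · -- the left candidate exists
    obtain ⟨hLlast, hL0⟩ := hLAL.2 hALe
    have hLn : ¬ (LI = -1) := by omega
    have hdesc : AL.foldl (pvStep start) none = some LI := by
      rw [descF start AL hALe hALle hpwAL, hLlast]
    rw [hdesc]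
    by_cases hBLe : BL = []
    · have hRn : RI = -1 := hRBL.1 hBLe
      rw [hBLe, List.foldl_nil, if_neg hLn, if_pos hRn]
    · obtain ⟨x, t, hxt⟩ := List.exists_cons_of_ne_nil hBLe
      obtain ⟨hxRI', hR0⟩ := hRBL.2 x t hxt
      have hRn : ¬ (RI = -1) := by omega
      have hxRI : x = RI := hxRI'.symm
      have hLle : LI ≤ start := hALle LI (by
        rw [hLlast]
        exact List.getLast_mem hALe)
      have hxgt : start < x := hBLgt x (by rw [hxt]; exact List.mem_cons_self)
      rw [hxt, List.foldl_cons]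
      have habsx : |x - start| = x - start := abs_of_pos (by omega)
      have habsL : |LI - start| = start - LI := by
        rw [abs_of_nonpos (by omega)]; ring
      by_cases hc : RI - start < start - LI
      · have hstep : pvStep start (some LI) x = some x := by
          show (if |x - start| < |LI - start| then some x else some LI) = some x
          rw [if_pos (by rw [habsx, habsL]; omega)]
        rw [hstep]
        have hkeep : t.foldl (pvStep start) (some x) = some x := by
          apply keepF
          intro y hy
          have hxy : x < y := by
            rw [hxt] at hpwBL
            exact (List.pairwise_cons.mp hpwBL).1 y hy
          rw [abs_of_pos (by omega : (0:Int) < y - start), habsx]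
          omega
        rw [hkeep, hxRI, if_neg hLn, if_neg hRn, if_pos hc]
      · have hstep : pvStep start (some LI) x = some LI := by
          show (if |x - start| < |LI - start| then some x else some LI) = some LI
          rw [if_neg (by rw [habsx, habsL]; omega)]
        rw [hstep]
        have hkeep : t.foldl (pvStep start) (some LI) = some LI := by
          apply keepF
          intro y hy
          have hxy : x < y := by
            rw [hxt] at hpwBL
            exact (List.pairwise_cons.mp hpwBL).1 y hy
          rw [abs_of_pos (by omega : (0:Int) < y - start), habsL]
          omega
        rw [hkeep, if_neg hLn, if_neg hRn, if_neg hc]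

-- assembling both ports against the two-candidate selection
theorem ports_eq (full_text : String) (start end_ : Int) (ent_text : String) :
    repair_offsets_py full_text start end_ ent_text
      = repair_offsets_py_alt full_text start end_ ent_text := by
  unfold repair_offsets_py repair_offsets_py_alt
  set ent := PySem.Str.strip ent_text with hent
  by_cases he : ent = ""
  · simp [he]
  · simp only [if_neg he]
    set s := full_text.toList with hs
    set sub := ent.toList with hsubdef
    have hsub : sub ≠ [] := fun h => he (String.toList_eq_nil_iff.mp h)
    have hA := repairLoopA_eq s sub hsub (s.length + 1) 0 (Nat.zero_le _) (by omega)
    rw [Nat.cast_zero, PySem.Chars.findFrom_zero] at hA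
    have hzero : ∀ j : Nat, decide (0 ≤ j) = true := by intro j; simp
    simp only [hzero, Bool.true_and] at hA
    have hflA : repairLoopA s sub (s.length + 1) (PySem.Chars.find s sub) = pvFl s sub := by
      rw [hA]; rfl
    rw [hflA]
    by_cases hstart : 0 ≤ start
    · rw [if_pos hstart]
      set LI := PySem.Chars.rfindFrom s sub 0 (some (start + (sub.length : Int))) with hLI
      set RI := PySem.Chars.findFrom s sub (start + 1) with hRI
      have hL := pvIsLeft_rfind s sub hsub start hstart
      have hR := pvIsRight_findFrom s sub hsub start hstart
      obtain ⟨hm1, hm2⟩ := min_eq_sel s sub hsub start LI RI hL hR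
      by_cases hfl : pvFl s sub = []
      · rw [if_pos hfl, if_pos (hm2.mp hfl)]
      · rw [if_neg hfl, hm1 hfl]
        have hnb : ¬ (LI = -1 ∧ RI = -1) := fun h => hfl (hm2.mpr h)
        rw [if_neg hnb]
        by_cases hLe : LI = -1
        · rw [if_pos hLe, if_pos hLe]
        · rw [if_neg hLe, if_neg hLe]
          by_cases hRe : RI = -1
          · rw [if_pos hRe, if_pos hRe]
          · rw [if_neg hRe, if_neg hRe]
            by_cases hc : RI - start < start - LI
            · rw [if_pos hc, if_pos hc]
            · rw [if_neg hc, if_neg hc]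
    · rw [if_neg hstart]
      have hL := pvIsLeft_neg s sub start (by omega)
      have hR := pvIsRight_neg s sub hsub start (by omega)
      obtain ⟨hm1, hm2⟩ := min_eq_sel s sub hsub start (-1) (PySem.Chars.find s sub) hL hR
      by_cases hfl : pvFl s sub = []
      · rw [if_pos hfl, if_pos (hm2.mp hfl)]
      · rw [if_neg hfl, hm1 hfl]
        have hnb : ¬ ((-1 : Int) = -1 ∧ PySem.Chars.find s sub = -1) := fun h => hfl (hm2.mpr h)
        rw [if_neg hnb, if_pos rfl, if_pos rfl]

-- ===== VERDICT (by name: the statement is the Claim_ definition above) =====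
theorem repair_offsets_py_spec : Claim_equal_repair_offsets_py := by
  intro full_text start end_ ent_text _
  unfold Spec_repair_offsets_py
  exact ports_eq full_text start end_ ent_text
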